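-- pv_equiv track=rewrite | github.com/GoldF15h/nest-Js-Showcase | validate_pincode.py | is_trend_up
-- ===== SOURCE A (Python) =====
-- def is_trend_up(pin_code):
--     cnt = 0
--     for i in range(len(pin_code)-1):
--         if pin_code[i] == pin_code[i+1] - 1:
--             cnt += 1
--             if cnt >= 2:
--                 return True
--         else:
--             cnt = 0
--     return False
-- ===== SOURCE B (Python) =====
-- def is_trend_up(pin_code):
--     for i in range(len(pin_code) - 2):
--         if pin_code[i] + 1 == pin_code[i + 1] and pin_code[i + 1] + 1 == pin_code[i + 2]:
--             return True
--     return False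
-- ===== Notes on version B (the rewrite author's own statement) =====
-- stated objective: simpler
-- what changed: Replaced the run-counter accumulator threaded across the loop by a stateless window-of-three scan that tests each triple independently.
import Mathlib
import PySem

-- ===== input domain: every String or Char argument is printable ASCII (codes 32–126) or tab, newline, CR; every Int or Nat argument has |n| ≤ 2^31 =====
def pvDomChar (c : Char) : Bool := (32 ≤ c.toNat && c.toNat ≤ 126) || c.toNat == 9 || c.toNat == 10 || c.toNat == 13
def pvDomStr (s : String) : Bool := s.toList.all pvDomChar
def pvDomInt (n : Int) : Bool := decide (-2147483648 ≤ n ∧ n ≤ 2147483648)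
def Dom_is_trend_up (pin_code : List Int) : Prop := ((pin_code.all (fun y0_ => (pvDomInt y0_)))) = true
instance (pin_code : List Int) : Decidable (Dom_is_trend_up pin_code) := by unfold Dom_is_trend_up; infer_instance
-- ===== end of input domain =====

-- B replaces A's run-counter accumulator with a stateless window-of-three scan (objective: simpler).


-- ===== PORT A =====
-- A's loop over i in range(len-1) comparing pin[i] with pin[i+1], threading cnt,
-- is transcribed as structural recursion over adjacent pairs with the same cnt state.
def isTrendUpGo (cnt : Int) : List Int → Bool
  | a :: b :: rest =>
      if a = b - 1 then
        if cnt + 1 ≥ 2 then true else isTrendUpGo (cnt + 1) (b :: rest)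
      else isTrendUpGo 0 (b :: rest)
  | _ => false

def is_trend_up (pin_code : List Int) : Bool := isTrendUpGo 0 pin_code

-- ===== PORT B =====
-- B's loop over i in range(len-2) testing each window of three independently.
def is_trend_up_alt : List Int → Bool
  | a :: b :: c :: rest =>
      if a + 1 = b ∧ b + 1 = c then true else is_trend_up_alt (b :: c :: rest)
  | _ => false

-- ===== PRECONDITION & SPEC =====
def Spec_is_trend_up (pin_code : List Int) (out : Bool) : Prop := out = is_trend_up_alt pin_code
instance (pin_code : List Int) (out : Bool) : Decidable (Spec_is_trend_up pin_code out) := by unfold Spec_is_trend_up; infer_instance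

-- ===== CLAIM (what is proved, stated in full; the proofs are below) =====
def Claim_equal_is_trend_up : Prop := ∀ (pin_code : List Int), Dom_is_trend_up pin_code → Spec_is_trend_up pin_code (is_trend_up pin_code)

-- ===== LEMMAS AND PROOFS =====

lemma go_cons (cnt a b : Int) (rest : List Int) :
    isTrendUpGo cnt (a :: b :: rest) =
      if a = b - 1 then
        (if cnt + 1 ≥ 2 then true else isTrendUpGo (cnt + 1) (b :: rest))
      else isTrendUpGo 0 (b :: rest) := rfl

lemma alt_cons (a b c : Int) (rest : List Int) :
    is_trend_up_alt (a :: b :: c :: rest) =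
      if a + 1 = b ∧ b + 1 = c then true else is_trend_up_alt (b :: c :: rest) := rfl

lemma isTrendUpGo_zero_eq_alt : ∀ l : List Int, isTrendUpGo 0 l = is_trend_up_alt l := by
  intro l
  induction l using is_trend_up_alt.induct
  case case1 a b c rest hc =>
    obtain ⟨hb, hcc⟩ := hc
    rw [go_cons, if_pos (by omega : a = b - 1), if_neg (by omega : ¬ ((0:Int) + 1 ≥ 2)),
        go_cons, if_pos (by omega : b = c - 1), if_pos (by omega : ((0:Int) + 1 + 1 ≥ 2)),
        alt_cons, if_pos ⟨hb, hcc⟩]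
  case case2 a b c rest hc ih =>
    rw [alt_cons, if_neg hc, go_cons]
    by_cases h1 : a = b - 1
    · have h2 : ¬ b = c - 1 := fun h2 => hc ⟨by omega, by omega⟩
      rw [if_pos h1, if_neg (by omega : ¬ ((0:Int) + 1 ≥ 2)), go_cons, if_neg h2, ← ih,
          go_cons, if_neg h2]
    · rw [if_neg h1, ih]
  case case3 t h =>
    match t, h with
    | [], _ => rfl
    | [_], _ => rfl
    | [a, b], _ =>
        rw [go_cons]
        split_ifs <;> first | rfl | omega
    | a :: b :: c :: r, h => exact (h a b c r rfl).elim

-- ===== VERDICT (by name: the statement is the Claim_ definition above) =====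
theorem is_trend_up_spec : Claim_equal_is_trend_up := by
  intro l _
  unfold Spec_is_trend_up is_trend_up
  exact isTrendUpGo_zero_eq_alt l
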